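-- pv_equiv track=rewrite | github.com/carlosortet/historia-computacion | _generador_narrativas_html.py | extract_subtitle
-- ===== SOURCE A (Python) =====
-- def extract_subtitle(body):
--     """Extrae el primer blockquote (TLDR) tras el h1 como subtítulo."""
--     lines = body.split("\n")
--     in_quote = False
--     quote_lines = []
--     for line in lines:
--         if line.startswith("> "):
--             quote_lines.append(line[2:].strip())
--             in_quote = True
--         elif in_quote:
--             break
--     return " ".join(quote_lines) if quote_lines else ""
-- ===== SOURCE B (Python) =====
-- def extract_subtitle(body):
--     """Extrae el primer blockquote (TLDR) tras el h1 como subtítulo."""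
--     lines = body.split("\n")
--     mask = [line.startswith("> ") for line in lines]
--     if True not in mask:
--         return ""
--     i = mask.index(True)
--     tail = mask[i:]
--     j = i + (tail.index(False) if False in tail else len(tail))
--     return " ".join(line[2:].strip() for line in lines[i:j])
-- ===== Notes on version B (the rewrite author's own statement) =====
-- stated objective: alternative
-- what changed: Replaces A's stateful flag-and-break scan with a staged computation: build a boolean mask of the lines, locate the block boundaries i and j with list.index on the mask, and join over the single slice lines[i:j].
import Mathlib
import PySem

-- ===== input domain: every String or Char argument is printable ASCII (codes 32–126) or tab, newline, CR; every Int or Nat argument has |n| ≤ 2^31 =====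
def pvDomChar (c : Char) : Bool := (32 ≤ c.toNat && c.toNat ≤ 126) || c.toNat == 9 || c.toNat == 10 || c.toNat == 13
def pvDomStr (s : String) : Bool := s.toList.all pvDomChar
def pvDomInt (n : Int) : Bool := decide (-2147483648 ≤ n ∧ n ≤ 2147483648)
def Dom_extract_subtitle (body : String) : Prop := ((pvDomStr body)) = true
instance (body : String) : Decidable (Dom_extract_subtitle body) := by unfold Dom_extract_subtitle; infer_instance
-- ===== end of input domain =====

-- B replaces A's stateful flag-and-break scan by a staged computation: a boolean mask of the
-- lines, block boundaries i,j found by list.index on the mask, then one slice lines[i:j]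
-- (alternative decomposition; same cost).

-- shared by both ports: body.split("\n") (sep ≠ "", so split? is always some; getD [] never fires),
-- line.startswith("> "), and line[2:].strip()
def pvLines (body : String) : List String := (PySem.Str.split? body "\n").getD []
def pvIsQuote (l : String) : Bool := PySem.Str.startswith l "> "
def pvQuoteText (l : String) : String := PySem.Str.strip (PySem.Str.slice l (some 2) none)

-- ===== PORT A =====
-- A's for-loop with the in_quote flag and the break
def pvLoopA : List String → Bool → List String → List String
  | [], _, acc => acc
  | l :: ls, inq, acc =>
    if pvIsQuote l then pvLoopA ls true (acc ++ [pvQuoteText l])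
    else if inq then acc
    else pvLoopA ls inq acc

def extract_subtitle (body : String) : String :=
  let quote_lines := pvLoopA (pvLines body) false []
  if quote_lines ≠ [] then PySem.Str.join " " quote_lines else ""

-- ===== PORT B =====
-- mask = [line.startswith("> ") for line in lines]; i = mask.index(True); tail = mask[i:];
-- j = i + (tail.index(False) if False in tail else len(tail)); join over lines[i:j].
-- mask.index(True)/tail.index(False) are guarded by the membership tests, so index? is some
-- there and the .getD 0 default never fires.
def extract_subtitle_alt (body : String) : String :=
  let lines := pvLines body
  let mask := lines.map pvIsQuote
  if !(mask.contains true) then ""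
  else
    let i := (PySem.List.index? mask true).getD 0
    let tail := PySem.List.slice mask (some (i : Int)) none
    let j := i + (if tail.contains false then (PySem.List.index? tail false).getD 0 else tail.length)
    PySem.Str.join " " ((PySem.List.slice lines (some (i : Int)) (some (j : Int))).map pvQuoteText)

-- ===== PRECONDITION & SPEC =====
def Spec_extract_subtitle (body : String) (out : String) : Prop := out = extract_subtitle_alt body
instance (body : String) (out : String) : Decidable (Spec_extract_subtitle body out) := by unfold Spec_extract_subtitle; infer_instance

-- ===== CLAIM (what is proved, stated in full; the proofs are below) =====
def Claim_equal_extract_subtitle : Prop := ∀ (body : String), Dom_extract_subtitle body → Spec_extract_subtitle body (extract_subtitle body)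

-- ===== LEMMAS AND PROOFS =====
-- With the flag set, A's loop appends exactly the leading quote lines and stops.
theorem pvLoopA_true (ls : List String) (acc : List String) :
    pvLoopA ls true acc = acc ++ (ls.takeWhile pvIsQuote).map pvQuoteText := by
  induction ls generalizing acc with
  | nil => simp [pvLoopA]
  | cons l ls ih =>
    by_cases h : pvIsQuote l = true
    · simp only [pvLoopA, h, if_true, List.takeWhile_cons_of_pos, List.map_cons, ih]
      simp
    · simp only [pvLoopA, h, if_false, List.takeWhile_cons_of_neg h, List.map_nil,
        List.append_nil, Bool.false_eq_true]
      simp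

-- With the flag unset and nothing captured yet, A's loop is drop-then-take.
theorem pvLoopA_false (ls : List String) :
    pvLoopA ls false [] =
      ((ls.dropWhile (fun l => !pvIsQuote l)).takeWhile pvIsQuote).map pvQuoteText := by
  induction ls with
  | nil => simp [pvLoopA]
  | cons l ls ih =>
    by_cases h : pvIsQuote l = true
    · rw [pvLoopA, if_pos h, pvLoopA_true, List.dropWhile_cons_of_neg (by simp [h]),
        List.takeWhile_cons_of_pos h, List.map_cons, List.nil_append]
      simp
    · rw [pvLoopA, if_neg h, if_neg (by simp), ih,
        List.dropWhile_cons_of_pos (by simp [h])]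

theorem pv_join_nil : PySem.Str.join " " ([] : List String) = "" := by decide

-- B's block-end computation on a sublist: take j recovers takeWhile.
theorem pv_takeJ (ls : List String) :
    ls.take (if (ls.map pvIsQuote).contains false
               then (PySem.List.index? (ls.map pvIsQuote) false).getD 0
               else (ls.map pvIsQuote).length)
      = ls.takeWhile pvIsQuote := by
  induction ls with
  | nil => simp
  | cons l ls ih =>
    by_cases h : pvIsQuote l = true
    · rw [List.map_cons, h, List.takeWhile_cons_of_pos h,
        PySem.List.index?_cons_of_ne _ (by decide)]
      by_cases hc : (ls.map pvIsQuote).contains false = true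
      · obtain ⟨k, hk⟩ := Option.isSome_iff_exists.mp
          ((PySem.List.index?_isSome_iff (ls.map pvIsQuote) false).mpr
            (by simpa using hc))
        rw [if_pos (by rw [List.contains_cons, hc]; rfl), hk]
        simp only [Option.map_some, Option.getD_some, List.take_succ_cons]
        simp only [hc, hk, if_true, Option.getD_some] at ih
        rw [ih]
      · have hc' : (ls.map pvIsQuote).contains false = false := by simpa using hc
        rw [if_neg (by rw [List.contains_cons, hc']; decide),
          List.length_cons, List.take_succ_cons]
        simp only [hc', Bool.false_eq_true, if_false] at ih
        rw [ih]
    · have h' : pvIsQuote l = false := by simpa using h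
      rw [List.map_cons, h', List.takeWhile_cons_of_neg (by simp [h']),
        PySem.List.index?_cons_self, if_pos (by rw [List.contains_cons]; rfl)]
      simp

-- B's staged mask/index/slice computation equals drop-then-take.
theorem pv_altCore (ls : List String) :
    (if !((ls.map pvIsQuote).contains true) then ""
     else
       let i := (PySem.List.index? (ls.map pvIsQuote) true).getD 0
       let tail := PySem.List.slice (ls.map pvIsQuote) (some (i : Int)) none
       let j := i + (if tail.contains false then (PySem.List.index? tail false).getD 0 else tail.length)
       PySem.Str.join " " ((PySem.List.slice ls (some (i : Int)) (some (j : Int))).map pvQuoteText))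
    = PySem.Str.join " "
        (((ls.dropWhile (fun l => !pvIsQuote l)).takeWhile pvIsQuote).map pvQuoteText) := by
  induction ls with
  | nil => simpa using pv_join_nil.symm
  | cons l ls ih =>
    by_cases h : pvIsQuote l = true
    · rw [List.dropWhile_cons_of_neg (by simp [h])]
      have hj := pv_takeJ (l :: ls)
      simp only [List.map_cons, h] at hj ⊢
      rw [if_neg (by simp)]
      simp only [PySem.List.index?_cons_self, Option.getD_some, Nat.cast_zero,
        PySem.List.slice_zero_start, PySem.List.slice_none_none, Nat.zero_add]
      rw [PySem.List.slice_to_natCast, hj]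
    · have h' : pvIsQuote l = false := by simpa using h
      rw [List.dropWhile_cons_of_pos (by simp [h'])]
      by_cases hc : (ls.map pvIsQuote).contains true = true
      · obtain ⟨k, hk⟩ := Option.isSome_iff_exists.mp
          ((PySem.List.index?_isSome_iff (ls.map pvIsQuote) true).mpr
            (by simpa using hc))
        rw [← ih]
        simp only [List.map_cons, h', List.contains_cons, hc, Bool.or_true, Bool.not_true,
          Bool.false_eq_true, if_false]
        rw [PySem.List.index?_cons_of_ne _ (by decide), hk]
        simp only [Option.map_some, Option.getD_some]
        have hdrop : PySem.List.slice (false :: ls.map pvIsQuote) (some ((k + 1 : Nat) : Int)) none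
            = PySem.List.slice (ls.map pvIsQuote) (some ((k : Nat) : Int)) none := by
          rw [PySem.List.slice_from_natCast, PySem.List.slice_from_natCast, List.drop_succ_cons]
        rw [hdrop]
        set m := (if (PySem.List.slice (ls.map pvIsQuote) (some ((k : Nat) : Int)) none).contains false
          then (PySem.List.index? (PySem.List.slice (ls.map pvIsQuote) (some ((k : Nat) : Int)) none) false).getD 0
          else (PySem.List.slice (ls.map pvIsQuote) (some ((k : Nat) : Int)) none).length) with hm
        have hsl : PySem.List.slice (l :: ls) (some ((k + 1 : Nat) : Int)) (some ((k + 1 + m : Nat) : Int))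
            = PySem.List.slice ls (some ((k : Nat) : Int)) (some ((k + m : Nat) : Int)) := by
          rw [PySem.List.slice_natCast, PySem.List.slice_natCast, List.drop_succ_cons]
          congr 1
          omega
        rw [hsl]
      · have hall : ∀ x ∈ ls, pvIsQuote x = false := by
          have hc' : (ls.map pvIsQuote).contains true = false := by simpa using hc
          simpa using hc'
        rw [← ih]
        simp [h']
        rw [if_pos hall, if_pos hall]

-- ===== VERDICT (by name: the statement is the Claim_ definition above) =====
theorem extract_subtitle_spec : Claim_equal_extract_subtitle := by
  intro body _
  show extract_subtitle body = extract_subtitle_alt body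
  unfold extract_subtitle extract_subtitle_alt
  rw [pvLoopA_false, pv_altCore]
  dsimp only
  split_ifs with h
  · rfl
  · simp only [ne_eq, not_not] at h
    rw [h, pv_join_nil]
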